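-- pv_equiv track=rewrite | github.com/Aaron349899401/myprograms | ccc/ccc_2025_J4.py | sun
-- ===== SOURCE A (Python) =====
-- def sun(weather):
--     n = len(weather)
--     longest = 0
--
--     for i in range(n):
--         flipped = weather[:]
--         flipped[i] = "S"
--
--         curr = 0
--         best = 0
--         for w in flipped:
--             if w == "S":
--                 curr += 1
--                 best = max(best, curr)
--             else:
--                 curr = 0
--         longest = max(longest, best)
--     return longest
-- ===== SOURCE B (Python) =====
-- def sun(weather):
--     best = cur = curS = 0
--     for w in weather:
--         if w == "S":
--             cur += 1
--             curS += 1
--         else: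
--             cur = curS + 1
--             curS = 0
--         best = max(best, cur)
--     return best
-- ===== Notes on version B (the rewrite author's own statement) =====
-- stated objective: faster
-- what changed: Replaces the try-every-flip outer loop (rebuild the list, rescan it for the best S-run, for each index) with a single left-to-right pass that tracks the longest S-run ending at the current position allowing one flipped non-S day.
import Mathlib
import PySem

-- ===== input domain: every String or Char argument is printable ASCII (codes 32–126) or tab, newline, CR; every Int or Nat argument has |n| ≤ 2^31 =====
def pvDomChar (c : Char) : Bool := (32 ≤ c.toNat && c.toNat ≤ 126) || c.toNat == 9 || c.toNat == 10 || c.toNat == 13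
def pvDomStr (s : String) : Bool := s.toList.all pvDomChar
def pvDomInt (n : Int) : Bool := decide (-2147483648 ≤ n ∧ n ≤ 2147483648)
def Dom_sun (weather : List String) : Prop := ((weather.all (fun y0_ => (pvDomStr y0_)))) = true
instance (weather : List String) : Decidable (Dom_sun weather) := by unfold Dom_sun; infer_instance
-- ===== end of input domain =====

-- B replaces A's try-every-flip rescan (quadratic) with one pass allowing a single flipped non-"S" day.

-- ===== PORT A =====
-- inner loop of A: scan `flipped` keeping (curr, best)
def sunStep (cb : Int × Int) (w : String) : Int × Int :=
  if w = "S" then (cb.1 + 1, max cb.2 (cb.1 + 1)) else (0, cb.2)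

def sunInner (flipped : List String) : Int × Int :=
  flipped.foldl sunStep (0, 0)

def sun (weather : List String) : Int :=
  (List.range weather.length).foldl
    (fun longest i => max longest (sunInner (weather.set i "S")).2) 0

-- ===== PORT B =====
-- one pass: cur = longest run ending here with ≤1 flipped day, curS = longest pure S-run ending here
def sunAltStep (s : Int × Int × Int) (w : String) : Int × Int × Int :=
  if w = "S" then (max s.1 (s.2.1 + 1), s.2.1 + 1, s.2.2 + 1)
  else (max s.1 (s.2.2 + 1), s.2.2 + 1, 0)

def sun_alt (weather : List String) : Int :=
  (weather.foldl sunAltStep (0, 0, 0)).1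

-- ===== PRECONDITION & SPEC =====
def Spec_sun (weather : List String) (out : Int) : Prop := out = sun_alt weather
instance (weather : List String) (out : Int) : Decidable (Spec_sun weather out) := by unfold Spec_sun; infer_instance

-- ===== CLAIM (what is proved, stated in full; the proofs are below) =====
def Claim_equal_sun : Prop := ∀ (weather : List String), Dom_sun weather → Spec_sun weather (sun weather)

-- ===== LEMMAS AND PROOFS =====

-- fold of "max with f i" over a list of indices
def fmax (f : Nat → Int) (a : Int) (L : List Nat) : Int :=
  L.foldl (fun b i => max b (f i)) a

-- maximal (over the flip position) pure-S suffix run of the flipped list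
def gmax (l : List String) : Int :=
  fmax (fun i => (sunInner (l.set i "S")).1) 0 (List.range l.length)

theorem fmax_cons (f : Nat → Int) (a : Int) (i : Nat) (L : List Nat) :
    fmax f a (i :: L) = fmax f (max a (f i)) L := rfl

theorem fmax_append_singleton (f : Nat → Int) (a : Int) (L : List Nat) (i : Nat) :
    fmax f a (L ++ [i]) = max (fmax f a L) (f i) := by
  simp [fmax, List.foldl_append]

theorem fmax_congr (f g : Nat → Int) (a : Int) (L : List Nat)
    (h : ∀ i ∈ L, f i = g i) : fmax f a L = fmax g a L := by
  induction L generalizing a with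
  | nil => rfl
  | cons i L ih =>
    rw [fmax_cons, fmax_cons, h i (by simp)]
    exact ih _ (fun j hj => h j (by simp [hj]))

theorem le_fmax_init (f : Nat → Int) (a : Int) (L : List Nat) : a ≤ fmax f a L := by
  induction L generalizing a with
  | nil => exact le_rfl
  | cons i L ih => exact le_trans (le_max_left _ _) (ih _)

theorem le_fmax_of_mem (f : Nat → Int) {i : Nat} {L : List Nat} (h : i ∈ L) (a : Int) :
    f i ≤ fmax f a L := by
  induction L generalizing a with
  | nil => simp at h
  | cons j L ih =>
    rcases List.mem_cons.mp h with h | h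
    · subst h
      exact le_trans (le_max_right _ _) (le_fmax_init _ _ _)
    · exact ih h _

theorem fmax_split (u v : Nat → Int) (a b : Int) (L : List Nat) :
    fmax (fun i => max (u i) (v i)) (max a b) L = max (fmax u a L) (fmax v b L) := by
  induction L generalizing a b with
  | nil => rfl
  | cons i L ih =>
    rw [fmax_cons, fmax_cons, fmax_cons]
    rw [show max (max a b) (max (u i) (v i)) = max (max a (u i)) (max b (v i)) by omega]
    exact ih _ _

theorem fmax_succ (v : Nat → Int) (a : Int) (L : List Nat) :
    fmax (fun i => v i + 1) (a + 1) L = fmax v a L + 1 := by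
  induction L generalizing a with
  | nil => rfl
  | cons i L ih =>
    rw [fmax_cons, fmax_cons]
    rw [show max (a + 1) (v i + 1) = max a (v i) + 1 by omega]
    exact ih _

theorem fmax_zero_fun (L : List Nat) (a : Int) (h : 0 ≤ a) :
    fmax (fun _ => (0 : Int)) a L = a := by
  induction L with
  | nil => rfl
  | cons i L ih => rw [fmax_cons, max_eq_left h]; exact ih

theorem sunInner_append (l : List String) (x : String) :
    sunInner (l ++ [x]) = sunStep (sunInner l) x := by
  simp [sunInner, List.foldl_append]

theorem sunStep_nonneg {a : Int × Int} (x : String) (h1 : 0 ≤ a.1) (h2 : 0 ≤ a.2) :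
    0 ≤ (sunStep a x).1 ∧ 0 ≤ (sunStep a x).2 := by
  simp only [sunStep]; split_ifs <;> (try dsimp only) <;> constructor <;> omega

theorem foldl_sunStep_nonneg (l : List String) (a : Int × Int) (h1 : 0 ≤ a.1) (h2 : 0 ≤ a.2) :
    0 ≤ (l.foldl sunStep a).1 ∧ 0 ≤ (l.foldl sunStep a).2 := by
  induction l generalizing a with
  | nil => exact ⟨h1, h2⟩
  | cons x t ih =>
    have := sunStep_nonneg x h1 h2
    exact ih _ this.1 this.2

theorem sunInner_nonneg (l : List String) :
    0 ≤ (sunInner l).1 ∧ 0 ≤ (sunInner l).2 :=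
  foldl_sunStep_nonneg l (0, 0) le_rfl le_rfl

theorem foldl_sunStep_mono (l : List String) (a b : Int × Int)
    (h1 : a.1 ≤ b.1) (h2 : a.2 ≤ b.2) :
    (l.foldl sunStep a).1 ≤ (l.foldl sunStep b).1 ∧
    (l.foldl sunStep a).2 ≤ (l.foldl sunStep b).2 := by
  induction l generalizing a b with
  | nil => exact ⟨h1, h2⟩
  | cons x t ih =>
    apply ih
    · simp only [sunStep]; split_ifs <;> (try dsimp only) <;> omega
    · simp only [sunStep]; split_ifs <;> (try dsimp only) <;> omega

theorem foldl_sunStep_set_ge (l : List String) (i : Nat) (a : Int × Int)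
    (h1 : 0 ≤ a.1) (h2 : 0 ≤ a.2) :
    (l.foldl sunStep a).1 ≤ ((l.set i "S").foldl sunStep a).1 ∧
    (l.foldl sunStep a).2 ≤ ((l.set i "S").foldl sunStep a).2 := by
  induction l generalizing i a with
  | nil => exact ⟨le_rfl, le_rfl⟩
  | cons x t ih =>
    cases i with
    | zero =>
      simp only [List.set_cons_zero, List.foldl_cons]
      apply foldl_sunStep_mono
      · simp only [sunStep]; split_ifs <;> (try dsimp only) <;> omega
      · simp only [sunStep]; split_ifs <;> (try dsimp only) <;> omega
    | succ i =>
      simp only [List.set_cons_succ, List.foldl_cons]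
      have := sunStep_nonneg x h1 h2
      exact ih i _ this.1 this.2

theorem sunInner_set_ge (l : List String) (i : Nat) :
    (sunInner l).1 ≤ (sunInner (l.set i "S")).1 ∧
    (sunInner l).2 ≤ (sunInner (l.set i "S")).2 :=
  foldl_sunStep_set_ge l i (0, 0) le_rfl le_rfl

theorem bS_le_sun (l : List String) : (sunInner l).2 ≤ sun l := by
  cases l with
  | nil => simp [sunInner, sun]
  | cons x t =>
    have hm : (0 : Nat) ∈ List.range (x :: t).length := by simp
    calc (sunInner (x :: t)).2 ≤ (sunInner ((x :: t).set 0 "S")).2 := (sunInner_set_ge _ 0).2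
    _ ≤ sun (x :: t) := le_fmax_of_mem _ hm _

theorem cS_le_gmax (l : List String) : (sunInner l).1 ≤ gmax l := by
  cases l with
  | nil => simp [sunInner, gmax, fmax]
  | cons x t =>
    have hm : (0 : Nat) ∈ List.range (x :: t).length := by simp
    calc (sunInner (x :: t)).1 ≤ (sunInner ((x :: t).set 0 "S")).1 := (sunInner_set_ge _ 0).1
    _ ≤ gmax (x :: t) := le_fmax_of_mem _ hm _

-- the key S-case identity: appending "S" bumps the best flipped suffix run by one
theorem hkey_S (l : List String) :
    max (fmax (fun i => (sunInner (l.set i "S")).1 + 1) 0 (List.range l.length))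
        ((sunInner l).1 + 1) = gmax l + 1 := by
  cases l with
  | nil => simp [fmax, gmax, sunInner]
  | cons y t =>
    have h0 : (0 : Int) ≤ (sunInner ((y :: t).set 0 "S")).1 := (sunInner_nonneg _).1
    have hr : List.range (y :: t).length = 0 :: List.map Nat.succ (List.range t.length) := by
      simp [List.range_succ_eq_map]
    have hfm : fmax (fun i => (sunInner ((y :: t).set i "S")).1 + 1) 0
          (List.range (y :: t).length) = gmax (y :: t) + 1 := by
      rw [hr, fmax_cons]
      rw [show max (0:Int) ((sunInner ((y :: t).set 0 "S")).1 + 1)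
          = (max 0 (sunInner ((y :: t).set 0 "S")).1) + 1 by omega]
      rw [fmax_succ]
      have : gmax (y :: t) = fmax (fun i => (sunInner ((y :: t).set i "S")).1)
          (max 0 (sunInner ((y :: t).set 0 "S")).1)
          (List.map Nat.succ (List.range t.length)) := by
        unfold gmax
        rw [hr, fmax_cons]
      rw [← this]
    rw [hfm]
    have := cS_le_gmax (y :: t)
    omega

-- the main invariant: B's fold state is (sun l, gmax l, (sunInner l).1)
theorem main_invariant (l : List String) :
    l.foldl sunAltStep (0, 0, 0) = (sun l, gmax l, (sunInner l).1) := by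
  induction l using List.reverseRecOn with
  | nil => simp [sun, gmax, fmax, sunInner]
  | append_singleton l x ih =>
    rw [List.foldl_append, List.foldl_cons, List.foldl_nil, ih]
    have hsetlt : ∀ i ∈ List.range l.length,
        (l ++ [x]).set i "S" = l.set i "S" ++ [x] := by
      intro i hi
      exact List.set_append_left i _ (List.mem_range.mp hi)
    have hsetn : (l ++ [x]).set l.length "S" = l ++ ["S"] := by
      rw [List.set_append, if_neg (by omega)]
      simp
    have hrange : List.range (l ++ [x]).length = List.range l.length ++ [l.length] := by
      simp [List.range_succ]
    have hsun : sun (l ++ [x]) =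
        max (fmax (fun i => (sunInner (l.set i "S" ++ [x])).2) 0 (List.range l.length))
            (max (sunInner l).2 ((sunInner l).1 + 1)) := by
      unfold sun
      rw [hrange]
      rw [show ((List.range l.length ++ [l.length]).foldl
            (fun longest i => max longest (sunInner ((l ++ [x]).set i "S")).2) 0)
          = fmax (fun i => (sunInner ((l ++ [x]).set i "S")).2) 0
              (List.range l.length ++ [l.length]) from rfl]
      rw [fmax_append_singleton, hsetn, sunInner_append]
      rw [fmax_congr _ (fun i => (sunInner (l.set i "S" ++ [x])).2) _ _
        (fun i hi => by rw [hsetlt i hi])]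
      simp [sunStep]
    have hg : gmax (l ++ [x]) =
        max (fmax (fun i => (sunInner (l.set i "S" ++ [x])).1) 0 (List.range l.length))
            ((sunInner l).1 + 1) := by
      unfold gmax
      rw [hrange, fmax_append_singleton, hsetn, sunInner_append]
      rw [fmax_congr _ (fun i => (sunInner (l.set i "S" ++ [x])).1) _ _
        (fun i hi => by rw [hsetlt i hi])]
      simp [sunStep]
    have hcS : (sunInner (l ++ [x])).1 = if x = "S" then (sunInner l).1 + 1 else 0 := by
      rw [sunInner_append]; unfold sunStep; split_ifs <;> rfl
    by_cases hx : x = "S"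
    · subst hx
      have hb : ∀ i, (sunInner (l.set i "S" ++ ["S"])).2
          = max (sunInner (l.set i "S")).2 ((sunInner (l.set i "S")).1 + 1) := by
        intro i; rw [sunInner_append]; simp [sunStep]
      have hc : ∀ i, (sunInner (l.set i "S" ++ ["S"])).1
          = (sunInner (l.set i "S")).1 + 1 := by
        intro i; rw [sunInner_append]; simp [sunStep]
      have hfb : fmax (fun i => (sunInner (l.set i "S" ++ ["S"])).2) 0 (List.range l.length)
          = max (sun l)
              (fmax (fun i => (sunInner (l.set i "S")).1 + 1) 0 (List.range l.length)) := by
        rw [fmax_congr _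
          (fun i => max (sunInner (l.set i "S")).2 ((sunInner (l.set i "S")).1 + 1)) _ _
          (fun i _ => hb i)]
        rw [show (0:Int) = max 0 0 from rfl, fmax_split]
        rfl
      have hfc : fmax (fun i => (sunInner (l.set i "S" ++ ["S"])).1) 0 (List.range l.length)
          = fmax (fun i => (sunInner (l.set i "S")).1 + 1) 0 (List.range l.length) :=
        fmax_congr _ _ _ _ (fun i _ => hc i)
      have hk := hkey_S l
      have h1 := bS_le_sun l
      have h2 := cS_le_gmax l
      refine Prod.ext ?_ (Prod.ext ?_ ?_)
      · show max (sun l) ((gmax l) + 1) = (sun (l ++ ["S"]), _, _).1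
        rw [hsun, hfb]
        dsimp only
        omega
      · show (gmax l) + 1 = _
        rw [hg, hfc]
        dsimp only
        omega
      · show (sunInner l).1 + 1 = _
        rw [hcS]
        simp
    · have hb : ∀ i, (sunInner (l.set i "S" ++ [x])).2 = (sunInner (l.set i "S")).2 := by
        intro i; rw [sunInner_append]; simp [sunStep, hx]
      have hc : ∀ i, (sunInner (l.set i "S" ++ [x])).1 = 0 := by
        intro i; rw [sunInner_append]; simp [sunStep, hx]
      have hfb : fmax (fun i => (sunInner (l.set i "S" ++ [x])).2) 0 (List.range l.length)
          = sun l := by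
        rw [fmax_congr _ (fun i => (sunInner (l.set i "S")).2) _ _ (fun i _ => hb i)]; rfl
      have hfc : fmax (fun i => (sunInner (l.set i "S" ++ [x])).1) 0 (List.range l.length)
          = 0 := by
        rw [fmax_congr _ (fun _ => (0:Int)) _ _ (fun i _ => hc i)]
        exact fmax_zero_fun _ _ le_rfl
      have h1 := bS_le_sun l
      have h5 := (sunInner_nonneg l).1
      refine Prod.ext ?_ (Prod.ext ?_ ?_)
      · show (sunAltStep (sun l, gmax l, (sunInner l).1) x).1 = _
        rw [hsun, hfb]
        simp only [sunAltStep, if_neg hx]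
        try dsimp only
        omega
      · show (sunAltStep (sun l, gmax l, (sunInner l).1) x).2.1 = _
        rw [hg, hfc]
        simp only [sunAltStep, if_neg hx]
        try dsimp only
        omega
      · show (sunAltStep (sun l, gmax l, (sunInner l).1) x).2.2 = _
        rw [hcS, if_neg hx]
        simp [sunAltStep, hx]

-- ===== VERDICT (by name: the statement is the Claim_ definition above) =====
theorem sun_spec : Claim_equal_sun := by
  intro weather _
  unfold Spec_sun sun_alt
  rw [main_invariant]
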